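-- pv_equiv track=rewrite | github.com/jmussamuhindo/GameTheory_Project | mex10.py | calculate_mex
-- ===== SOURCE A (Python) =====
-- import heapq
--
-- def calculate_mex(heap):
--     """ Calculates the minimum excludant (mex) for a given heap. """
--     # Since the heap can be modified, work on a copy
--     temp_heap = list(heap)  # Create a shallow copy to avoid modifying the original heap
--     seen = set()
--     while temp_heap:
--         element = heapq.heappop(temp_heap)
--         seen.add(element)
--     # Calculate mex
--     mex = 0
--     while mex in seen:
--         mex += 1
--     return mex
-- ===== SOURCE B (Python) =====
-- def calculate_mex(heap):
--     """ Calculates the minimum excludant (mex) for a given heap. """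
--     mex = 0
--     for v in sorted(heap):
--         if v == mex:
--             mex += 1
--         elif v > mex:
--             break
--     return mex
-- ===== Notes on version B (the rewrite author's own statement) =====
-- stated objective: simpler
-- what changed: B replaces A's heappop-everything-into-a-set then count-upward-while-member strategy with a single sorted() call followed by one linear gap scan over the sorted values.
import Mathlib
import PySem

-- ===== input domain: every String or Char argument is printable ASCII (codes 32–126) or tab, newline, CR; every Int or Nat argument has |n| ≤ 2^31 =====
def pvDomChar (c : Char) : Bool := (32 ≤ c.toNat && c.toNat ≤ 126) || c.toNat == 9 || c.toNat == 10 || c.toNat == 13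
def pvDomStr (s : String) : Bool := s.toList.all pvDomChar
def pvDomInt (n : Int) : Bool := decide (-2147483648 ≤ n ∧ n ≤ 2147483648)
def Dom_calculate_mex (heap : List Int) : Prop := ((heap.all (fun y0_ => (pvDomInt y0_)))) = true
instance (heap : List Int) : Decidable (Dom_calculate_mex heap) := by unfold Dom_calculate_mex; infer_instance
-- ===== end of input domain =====

-- B is a simpler re-implementation: one sorted() call then a single linear gap scan,
-- instead of A's heappop-into-a-set loop followed by counting upward while the counter is a member.

-- ===== PORT A =====
-- CPython heapq._siftup's child selection (lines 'rightpos = childpos + 1; if rightpos < endpos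
-- and not heap[childpos] < heap[rightpos]: childpos = rightpos'), factored as a helper; exact.
def pvChild (heap : List Int) (endpos childpos : Nat) : Nat :=
  if childpos + 1 < endpos ∧ ¬ heap.getD childpos 0 < heap.getD (childpos + 1) 0
  then childpos + 1 else childpos

-- CPython heapq._siftup inner while-loop (hand port of the library code A calls; exact).
-- 'fuel' only makes the recursion structural; endpos - pos shrinks every iteration, so
-- fuel = endpos at the call site is never exhausted.
def pvSiftupLoop (fuel : Nat) (heap : List Int) (endpos pos : Nat) : List Int × Nat :=
  match fuel with
  | 0 => (heap, pos)
  | fuel + 1 =>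
    if 2 * pos + 1 < endpos then
      pvSiftupLoop fuel (heap.set pos (heap.getD (pvChild heap endpos (2 * pos + 1)) 0)) endpos
        (pvChild heap endpos (2 * pos + 1))
    else (heap, pos)

-- CPython heapq._siftdown inner while-loop (hand port; exact; parentpos = (pos-1) >> 1 inlined).
-- fuel = pos at the call site is never exhausted (pos strictly decreases).
def pvSiftdownLoop (fuel : Nat) (heap : List Int) (startpos pos : Nat) (newitem : Int) :
    List Int × Nat :=
  match fuel with
  | 0 => (heap, pos)
  | fuel + 1 =>
    if startpos < pos then
      if newitem < heap.getD ((pos - 1) / 2) 0 then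
        pvSiftdownLoop fuel (heap.set pos (heap.getD ((pos - 1) / 2) 0)) startpos ((pos - 1) / 2)
          newitem
      else (heap, pos)
    else (heap, pos)

-- CPython heapq._siftdown (hand port; exact).
def pvSiftdown (heap : List Int) (startpos pos : Nat) : List Int :=
  let newitem := heap.getD pos 0
  let r := pvSiftdownLoop pos heap startpos pos newitem
  r.1.set r.2 newitem

-- CPython heapq._siftup (hand port; exact).
def pvSiftup (heap : List Int) (pos : Nat) : List Int :=
  let newitem := heap.getD pos 0
  let r := pvSiftupLoop heap.length heap heap.length pos
  pvSiftdown (r.1.set r.2 newitem) pos r.2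

-- CPython heapq.heappop (hand port; exact on nonempty lists — A only calls it on a nonempty heap).
def pvHeappop (heap : List Int) : Int × List Int :=
  let lastelt := heap.getLast?.getD 0
  let rest := heap.dropLast
  if rest.isEmpty then (lastelt, rest)
  else
    let returnitem := rest.getD 0 0
    (returnitem, pvSiftup (rest.set 0 lastelt) 0)

-- A's first while-loop: pop every element, adding it to the set 'seen'.
-- fuel = heap.length suffices: every heappop removes exactly one element.
def pvPopAll (fuel : Nat) (heap : List Int) (seen : PySem.Set Int) : PySem.Set Int :=
  match fuel with
  | 0 => seen
  | fuel + 1 =>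
    match heap with
    | [] => seen
    | _ :: _ => pvPopAll fuel (pvHeappop heap).2 (PySem.Set.add seen (pvHeappop heap).1)

-- A's second while-loop: count mex upward while it is a member of 'seen'.
-- fuel = seen.length + 1 suffices: each successful membership test consumes a distinct member.
def pvMexLoop (fuel : Nat) (seen : PySem.Set Int) (mex : Int) : Int :=
  match fuel with
  | 0 => mex
  | fuel + 1 =>
    if PySem.Set.contains seen mex then pvMexLoop fuel seen (mex + 1) else mex

def calculate_mex (heap : List Int) : Int :=
  let temp_heap := heap
  let seen := pvPopAll temp_heap.length temp_heap PySem.Set.empty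
  pvMexLoop (seen.length + 1) seen 0

-- ===== PORT B =====
-- B's for-loop over sorted(heap): advance mex on a match, stop at the first gap, skip smaller values.
def pvScan : List Int → Int → Int
  | [], mex => mex
  | v :: rest, mex =>
    if v = mex then pvScan rest (mex + 1)
    else if mex < v then mex
    else pvScan rest mex

def calculate_mex_alt (heap : List Int) : Int :=
  pvScan (PySem.List.sorted heap (fun x => x) false) 0

-- ===== PRECONDITION & SPEC =====
def Spec_calculate_mex (heap : List Int) (out : Int) : Prop := out = calculate_mex_alt heap
instance (heap : List Int) (out : Int) : Decidable (Spec_calculate_mex heap out) := by unfold Spec_calculate_mex; infer_instance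

-- ===== CLAIM (what is proved, stated in full; the proofs are below) =====
def Claim_equal_calculate_mex : Prop := ∀ (heap : List Int), Dom_calculate_mex heap → Spec_calculate_mex heap (calculate_mex heap)

-- ===== LEMMAS AND PROOFS =====

theorem pvChild_ge (heap : List Int) (endpos childpos : Nat) :
    childpos ≤ pvChild heap endpos childpos := by
  unfold pvChild; split <;> omega

theorem pvChild_lt (heap : List Int) (endpos childpos : Nat) (h : childpos < endpos) :
    pvChild heap endpos childpos < endpos := by
  unfold pvChild; split <;> omega

theorem pvSiftupLoop_length (fuel : Nat) (heap : List Int) (endpos pos : Nat) :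
    (pvSiftupLoop fuel heap endpos pos).1.length = heap.length := by
  induction fuel generalizing heap pos with
  | zero => rfl
  | succ fuel ih =>
    simp only [pvSiftupLoop]
    split
    · simp [ih]
    · rfl

theorem pvSiftdownLoop_length (fuel : Nat) (heap : List Int) (s p : Nat) (ni : Int) :
    (pvSiftdownLoop fuel heap s p ni).1.length = heap.length := by
  induction fuel generalizing heap p with
  | zero => rfl
  | succ fuel ih =>
    simp only [pvSiftdownLoop]
    split
    · split
      · simp [ih]
      · rfl
    · rfl

theorem pvSiftup_length (heap : List Int) (pos : Nat) :
    (pvSiftup heap pos).length = heap.length := by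
  simp [pvSiftup, pvSiftdown, pvSiftdownLoop_length, pvSiftupLoop_length]

theorem pvHeappop_length (heap : List Int) (_h : heap ≠ []) :
    (pvHeappop heap).2.length = heap.length - 1 := by
  simp [pvHeappop]
  split
  · simp
  · simp [pvSiftup_length]

-- counting after an in-range list update
theorem count_set_add (l : List Int) (i : Nat) (a y : Int) (h : i < l.length) :
    (l.set i a).count y + (if l.getD i 0 = y then 1 else 0)
      = l.count y + (if a = y then 1 else 0) := by
  induction l generalizing i with
  | nil => simp at h
  | cons x t ih =>
    cases i with
    | zero => simp [List.count_cons]; split_ifs <;> simp_all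
    | succ n =>
      have hn : n < t.length := by simpa using h
      have := ih n hn
      simp only [List.set, List.getD_cons_succ, List.count_cons]
      split_ifs at this ⊢ <;> simp_all

theorem perm_of_count (l l' : List Int) (h : ∀ y, l.count y = l'.count y) : l.Perm l' :=
  List.perm_iff_count.mpr h

-- exchanging two in-range updates, the second writing over the value read at the first
theorem exchange_perm (l : List Int) (p q : Nat) (x : Int)
    (hp : p < l.length) (hq : q < l.length) (hne : p ≠ q) :
    ((l.set p (l.getD q 0)).set q x).Perm (l.set p x) := by
  apply perm_of_count
  intro y
  have h1 := count_set_add (l.set p (l.getD q 0)) q x y (by simpa using hq)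
  have h2 := count_set_add l p (l.getD q 0) y hp
  have h3 := count_set_add l p x y hp
  have h4 : (l.set p (l.getD q 0)).getD q 0 = l.getD q 0 := by
    simp only [List.getD]
    rw [List.getElem?_set_ne hne]
  rw [h4] at h1
  split_ifs at h1 h2 h3 <;> omega

theorem perm_set_getD (l : List Int) (i : Nat) (h : i < l.length) :
    (l.set i (l.getD i 0)).Perm l := by
  apply perm_of_count
  intro y
  have := count_set_add l i (l.getD i 0) y h
  omega

theorem pvSiftupLoop_perm (fuel : Nat) (heap : List Int) (endpos pos : Nat)
    (he : endpos = heap.length) (hp : pos < endpos) (hf : endpos - pos ≤ fuel) :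
    (pvSiftupLoop fuel heap endpos pos).2 < endpos ∧
    ∀ x : Int, ((pvSiftupLoop fuel heap endpos pos).1.set (pvSiftupLoop fuel heap endpos pos).2
      x).Perm (heap.set pos x) := by
  induction fuel generalizing heap pos with
  | zero => omega
  | succ fuel ih =>
    simp only [pvSiftupLoop]
    split
    · rename_i hc
      have hge := pvChild_ge heap endpos (2 * pos + 1)
      have hlt := pvChild_lt heap endpos (2 * pos + 1) hc
      obtain ⟨i1, i2⟩ := ih (heap.set pos (heap.getD (pvChild heap endpos (2 * pos + 1)) 0))
        (pvChild heap endpos (2 * pos + 1)) (by simpa using he) hlt (by omega)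
      exact ⟨i1, fun x => (i2 x).trans
        (exchange_perm heap pos (pvChild heap endpos (2 * pos + 1)) x (by omega) (by omega)
          (by omega))⟩
    · exact ⟨hp, fun x => List.Perm.refl _⟩

theorem pvSiftdownLoop_perm (fuel : Nat) (heap : List Int) (s p : Nat) (ni : Int)
    (hp : p < heap.length) (hf : p ≤ fuel) :
    (pvSiftdownLoop fuel heap s p ni).2 < heap.length ∧
    ∀ x : Int, ((pvSiftdownLoop fuel heap s p ni).1.set (pvSiftdownLoop fuel heap s p ni).2
      x).Perm (heap.set p x) := by
  induction fuel generalizing heap p with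
  | zero =>
    simp only [pvSiftdownLoop]
    exact ⟨hp, fun x => List.Perm.refl _⟩
  | succ fuel ih =>
    simp only [pvSiftdownLoop]
    split
    · rename_i h
      split
      · have hq : (p - 1) / 2 < heap.length := by omega
        obtain ⟨i1, i2⟩ := ih (heap.set p (heap.getD ((p - 1) / 2) 0)) ((p - 1) / 2)
          (by simpa using hq) (by omega)
        exact ⟨by simpa using i1, fun x => (i2 x).trans
          (exchange_perm heap p ((p - 1) / 2) x hp (by omega) (by omega))⟩
      · exact ⟨hp, fun x => List.Perm.refl _⟩
    · exact ⟨hp, fun x => List.Perm.refl _⟩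

theorem pvSiftdown_perm (heap : List Int) (s p : Nat) (hp : p < heap.length) :
    (pvSiftdown heap s p).Perm heap := by
  have h := pvSiftdownLoop_perm p heap s p (heap.getD p 0) hp (le_refl _)
  unfold pvSiftdown
  exact (h.2 _).trans (perm_set_getD heap p hp)

theorem pvSiftup_perm (heap : List Int) (p : Nat) (hp : p < heap.length) :
    (pvSiftup heap p).Perm heap := by
  have h := pvSiftupLoop_perm heap.length heap heap.length p rfl hp (by omega)
  unfold pvSiftup
  have hlen := pvSiftupLoop_length heap.length heap heap.length p
  have h2 : ((pvSiftupLoop heap.length heap heap.length p).1.set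
      (pvSiftupLoop heap.length heap heap.length p).2 (heap.getD p 0)).Perm heap :=
    (h.2 _).trans (perm_set_getD heap p hp)
  have h3 : (pvSiftupLoop heap.length heap heap.length p).2 <
      ((pvSiftupLoop heap.length heap heap.length p).1.set
        (pvSiftupLoop heap.length heap heap.length p).2 (heap.getD p 0)).length := by
    simpa [hlen] using h.1
  exact (pvSiftdown_perm _ p _ h3).trans h2

theorem dropLast_getLastD (l : List Int) (hl : l ≠ []) :
    l.dropLast ++ [l.getLast?.getD 0] = l := by
  induction l with
  | nil => simp at hl
  | cons x xs ih =>
    cases xs with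
    | nil => simp
    | cons y ys =>
      have := ih (by simp)
      simp only [List.dropLast_cons_of_ne_nil (by simp : (y :: ys : List Int) ≠ []),
        List.getLast?_cons_cons, List.cons_append, List.cons.injEq, true_and] at this ⊢
      exact this

theorem pvHeappop_perm (heap : List Int) (h : heap ≠ []) :
    ((pvHeappop heap).1 :: (pvHeappop heap).2).Perm heap := by
  match heap with
  | [a] => simp [pvHeappop]
  | a :: b :: t =>
    have hx : (a :: b :: t).getLast?.getD 0 = (b :: t).getLast?.getD 0 := by
      simp [List.getLast?_cons_cons]
    have hdrop : (a :: b :: t).dropLast = a :: (b :: t).dropLast := by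
      simp [List.dropLast_cons_of_ne_nil]
    have hkey : (b :: t).dropLast ++ [(b :: t).getLast?.getD 0] = b :: t :=
      dropLast_getLastD (b :: t) (by simp)
    have h2 : ((b :: t).getLast?.getD 0 :: (b :: t).dropLast).Perm (b :: t) := by
      have h2' := (List.perm_append_singleton ((b :: t).getLast?.getD 0) ((b :: t).dropLast)).symm
      rwa [hkey] at h2'
    have hperm : (pvSiftup ((a :: b :: t).dropLast.set 0 ((a :: b :: t).getLast?.getD 0)) 0).Perm
        ((b :: t).getLast?.getD 0 :: (b :: t).dropLast) := by
      rw [hdrop, hx, List.set_cons_zero]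
      exact pvSiftup_perm _ 0 (by simp)
    have hfin := List.Perm.cons a (hperm.trans h2)
    simp only [pvHeappop, hdrop, List.isEmpty_cons, List.getD_cons_zero]
    simpa using hfin

theorem pvPopAll_mem (fuel : Nat) (heap : List Int) (seen : PySem.Set Int) (x : Int)
    (hf : heap.length ≤ fuel) :
    x ∈ pvPopAll fuel heap seen ↔ x ∈ heap ∨ x ∈ seen := by
  induction fuel generalizing heap seen with
  | zero =>
    have : heap = [] := by
      cases heap with
      | nil => rfl
      | cons a t => simp at hf
    subst this
    simp [pvPopAll]
  | succ fuel ih =>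
    cases heap with
    | nil => simp [pvPopAll]
    | cons a t =>
      have hperm := pvHeappop_perm (a :: t) (by simp)
      have hlen : (pvHeappop (a :: t)).2.length = t.length := by
        simpa using pvHeappop_length (a :: t) (by simp)
      have hmem : ∀ y : Int,
          y ∈ (a :: t) ↔ y = (pvHeappop (a :: t)).1 ∨ y ∈ (pvHeappop (a :: t)).2 := by
        intro y
        rw [← hperm.mem_iff]
        simp
      simp only [pvPopAll]
      rw [ih _ _ (by simp at hf; omega)]
      simp only [PySem.Set.mem_add, hmem x]
      tauto

-- each successful membership test consumes a distinct element ≥ mex of 'seen'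
theorem countP_succ_lt (seen : List Int) (mex : Int) (hm : mex ∈ seen) :
    seen.countP (fun x => decide (mex + 1 ≤ x)) < seen.countP (fun x => decide (mex ≤ x)) := by
  induction seen with
  | nil => simp at hm
  | cons a t ih =>
    rcases List.mem_cons.mp hm with rfl | hm'
    · simp only [List.countP_cons]
      have h1 : t.countP (fun x => decide (mex + 1 ≤ x)) ≤ t.countP (fun x => decide (mex ≤ x)) := by
        apply List.countP_mono_left
        intro x _ hx
        simp at hx ⊢; omega
      simp only [decide_eq_true_eq]
      split_ifs <;> omega
    · have := ih hm'
      simp only [List.countP_cons, decide_eq_true_eq]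
      split_ifs <;> omega

theorem pvMexLoop_spec (fuel : Nat) (seen : PySem.Set Int) (m : Int)
    (hf : seen.countP (fun x => decide (m ≤ x)) < fuel) :
    m ≤ pvMexLoop fuel seen m ∧ pvMexLoop fuel seen m ∉ seen ∧
      ∀ k, m ≤ k → k < pvMexLoop fuel seen m → k ∈ seen := by
  induction fuel generalizing m with
  | zero => omega
  | succ fuel ih =>
    simp only [pvMexLoop]
    split
    · rename_i hmem
      have hm : m ∈ seen := by simpa [PySem.Set.contains] using hmem
      have hcnt := countP_succ_lt seen m hm
      obtain ⟨j1, j2, j3⟩ := ih (m + 1) (by omega)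
      refine ⟨by omega, j2, fun k hk1 hk2 => ?_⟩
      rcases eq_or_lt_of_le hk1 with rfl | hlt
      · exact hm
      · exact j3 k (by omega) hk2
    · rename_i hmem
      have hm : m ∉ seen := by simpa [PySem.Set.contains] using hmem
      exact ⟨le_refl _, hm, fun k hk1 hk2 => absurd (lt_of_le_of_lt hk1 hk2) (lt_irrefl _)⟩

theorem pvScan_spec (s : List Int) (hs : s.Pairwise (fun a b => a ≤ b)) (m : Int) :
    m ≤ pvScan s m ∧ pvScan s m ∉ s ∧ ∀ k, m ≤ k → k < pvScan s m → k ∈ s := by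
  induction s generalizing m with
  | nil => exact ⟨le_refl _, by simp, fun k hk1 hk2 => absurd (lt_of_le_of_lt hk1 hk2) (lt_irrefl _)⟩
  | cons v rest ih =>
    have hrest : rest.Pairwise (fun a b => a ≤ b) := (List.pairwise_cons.mp hs).2
    have hvall : ∀ y ∈ rest, v ≤ y := (List.pairwise_cons.mp hs).1
    by_cases hveq : v = m
    · subst hveq
      have hred : pvScan (v :: rest) v = pvScan rest (v + 1) := by simp [pvScan]
      have := ih hrest (v + 1)
      rw [hred]
      refine ⟨by omega, ?_, fun k hk1 hk2 => ?_⟩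
      · intro hmem
        rcases List.mem_cons.mp hmem with heq | hmem'
        · omega
        · exact this.2.1 hmem'
      · rcases eq_or_lt_of_le hk1 with rfl | hlt
        · exact List.mem_cons_self
        · exact List.mem_cons_of_mem _ (this.2.2 k (by omega) hk2)
    · by_cases hvgt : m < v
      · have hred : pvScan (v :: rest) m = m := by simp [pvScan, hveq, hvgt]
        rw [hred]
        refine ⟨le_refl _, ?_, fun k hk1 hk2 => absurd (lt_of_le_of_lt hk1 hk2) (lt_irrefl _)⟩
        intro hmem
        rcases List.mem_cons.mp hmem with heq | hmem'
        · omega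
        · exact absurd (hvall m hmem') (by omega)
      · have hred : pvScan (v :: rest) m = pvScan rest m := by
          simp [pvScan, hveq, hvgt]
        have := ih hrest m
        rw [hred]
        refine ⟨this.1, ?_, fun k hk1 hk2 => List.mem_cons_of_mem _ (this.2.2 k hk1 hk2)⟩
        intro hmem
        rcases List.mem_cons.mp hmem with heq | hmem'
        · omega
        · exact this.2.1 hmem'

theorem mem_seen_iff (heap : List Int) (x : Int) :
    x ∈ pvPopAll heap.length heap PySem.Set.empty ↔ x ∈ heap := by
  rw [pvPopAll_mem _ _ _ _ (le_refl _)]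
  simp [PySem.Set.empty]

-- ===== VERDICT (by name: the statement is the Claim_ definition above) =====
theorem calculate_mex_spec : Claim_equal_calculate_mex := by
  intro heap _
  unfold Spec_calculate_mex calculate_mex calculate_mex_alt
  have hfuel : (pvPopAll heap.length heap PySem.Set.empty).countP
      (fun x => decide ((0 : Int) ≤ x)) < (pvPopAll heap.length heap PySem.Set.empty).length + 1 :=
    Nat.lt_succ_of_le List.countP_le_length
  have hA := pvMexLoop_spec ((pvPopAll heap.length heap PySem.Set.empty).length + 1)
    (pvPopAll heap.length heap PySem.Set.empty) 0 hfuel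
  have hB := pvScan_spec (PySem.List.sorted heap (fun x => x) false)
    (by simpa using PySem.List.sorted_pairwise heap (fun x => x)) 0
  set r1 := pvMexLoop ((pvPopAll heap.length heap PySem.Set.empty).length + 1)
    (pvPopAll heap.length heap PySem.Set.empty) 0 with hr1
  set r2 := pvScan (PySem.List.sorted heap (fun x => x) false) 0 with hr2
  have hmemA : ∀ y, y ∈ pvPopAll heap.length heap PySem.Set.empty ↔ y ∈ heap := fun y =>
    mem_seen_iff heap y
  have hmemB : ∀ y, y ∈ PySem.List.sorted heap (fun x => x) false ↔ y ∈ heap := fun y =>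
    PySem.List.mem_sorted heap (fun x => x) false y
  rcases lt_trichotomy r1 r2 with hlt | heq | hgt
  · exact absurd ((hmemA r1).mpr ((hmemB r1).mp (hB.2.2 r1 hA.1 hlt))) hA.2.1
  · exact heq
  · exact absurd ((hmemB r2).mpr ((hmemA r2).mp (hA.2.2 r2 hB.1 hgt))) hB.2.1
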